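-- pv_equiv track=rewrite | github.com/dustinsgoodman/advent-of-code | 2022/day_8/solution.py | is_interior_visible
-- ===== SOURCE A (Python) =====
-- def check_direction(target_height, check_list):
--     """given a target height and the directional list, check if the height is taller"""
--     for height in check_list:
--         if height >= target_height:
--             return False
--
--     return True
--
-- def is_interior_visible(grid, row, col):
--     """returns if the current cell is visible"""
--     target_height = grid[row][col]
--
--     # check left
--     if check_direction(target_height, grid[row][:col]):
--         return True
--
--     # check top
--     if check_direction(target_height, [grid[y][col] for y in range(0, row)]):
--         return True
--
--     # check right
--     if check_direction(target_height, grid[row][col+1:]):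
--         return True
--
--     # check bottom
--     if check_direction(target_height, [grid[y][col] for y in range(row+1, len(grid))]):
--         return True
--
--     return False
-- ===== SOURCE B (Python) =====
-- def is_interior_visible(grid, row, col):
--     """returns if the current cell is visible"""
--     target = grid[row][col]
--     for dr, dc in ((0, -1), (-1, 0), (0, 1), (1, 0)):
--         r, c = row + dr, col + dc
--         while 0 <= r < len(grid) and 0 <= c < len(grid[r]):
--             if grid[r][c] >= target:
--                 break
--             r += dr
--             c += dc
--         else:
--             return True
--     return False
-- ===== Notes on version B (the rewrite author's own statement) =====
-- stated objective: alternative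
-- what changed: Replaces A's four materialised sub-lists (two slices, two column comprehensions) plus a helper scan by a single bounds-checked coordinate walk over the four direction deltas with early exit.
-- outside the precondition, e.g. on is_interior_visible([[9, 9], [5, 1], [9, 9]], 1, -1): A returns False, B returns True; on is_interior_visible([[3, 1], [2]], 0, 1): A returns True, B returns True
import Mathlib
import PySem

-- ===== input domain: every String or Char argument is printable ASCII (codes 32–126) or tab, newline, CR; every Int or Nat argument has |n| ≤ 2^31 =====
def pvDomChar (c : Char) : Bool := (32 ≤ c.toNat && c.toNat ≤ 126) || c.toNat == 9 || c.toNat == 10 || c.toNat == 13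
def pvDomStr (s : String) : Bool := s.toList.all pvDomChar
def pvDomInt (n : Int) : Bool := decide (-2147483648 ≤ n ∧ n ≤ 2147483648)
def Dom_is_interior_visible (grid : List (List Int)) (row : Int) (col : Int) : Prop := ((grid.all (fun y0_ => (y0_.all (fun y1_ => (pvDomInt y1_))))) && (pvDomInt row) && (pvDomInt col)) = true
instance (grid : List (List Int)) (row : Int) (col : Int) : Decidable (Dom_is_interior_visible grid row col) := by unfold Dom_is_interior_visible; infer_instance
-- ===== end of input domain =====

-- B replaces A's four built-sublists + helper scan by a single bounds-checked
-- coordinate walk over the four direction deltas (objective: alternative decomposition).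

-- ===== PORT A =====
-- helper check_direction: scans the list, False at the first height ≥ target
def check_direction (target : Int) : List Int → Bool
  | [] => true
  | h :: t => if h ≥ target then false else check_direction target t

-- literal transliteration of A; the .getD defaults are unreachable inside Pre_
def is_interior_visible (grid : List (List Int)) (row : Int) (col : Int) : Bool :=
  let rowL := (PySem.List.pyGet? grid row).getD []
  let target := (PySem.List.pyGet? rowL col).getD 0
  -- check left: grid[row][:col]
  if check_direction target (PySem.List.slice rowL none (some col)) then true
  -- check top: [grid[y][col] for y in range(0, row)]
  else if check_direction target ((PySem.List.pyRange 0 row 1).map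
      (fun y => (PySem.List.pyGet? ((PySem.List.pyGet? grid y).getD []) col).getD 0)) then true
  -- check right: grid[row][col+1:]
  else if check_direction target (PySem.List.slice rowL (some (col + 1)) none) then true
  -- check bottom: [grid[y][col] for y in range(row+1, len(grid))]
  else if check_direction target ((PySem.List.pyRange (row + 1) (grid.length : Int) 1).map
      (fun y => (PySem.List.pyGet? ((PySem.List.pyGet? grid y).getD []) col).getD 0)) then true
  else false

-- ===== PORT B =====
-- the while-loop of Source B: step (r,c) by (dr,dc) while in bounds; False on a blocker,
-- True when the boundary is left.  fuel only makes the recursion structural; it is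
-- larger than any possible number of steps, so it never runs out on a real walk.
def walkDir (grid : List (List Int)) (target dr dc : Int) : Int → Int → Nat → Bool
  | _, _, 0 => false
  | r, c, fuel + 1 =>
    if 0 ≤ r ∧ r < (grid.length : Int) ∧ 0 ≤ c ∧
        c < (((PySem.List.pyGet? grid r).getD []).length : Int) then
      if (PySem.List.pyGet? ((PySem.List.pyGet? grid r).getD []) c).getD 0 ≥ target then false
      else walkDir grid target dr dc (r + dr) (c + dc) fuel
    else true

def pvFuel (grid : List (List Int)) : Nat := grid.length + (grid.map List.length).sum + 1

def is_interior_visible_alt (grid : List (List Int)) (row : Int) (col : Int) : Bool :=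
  let target := (PySem.List.pyGet? ((PySem.List.pyGet? grid row).getD []) col).getD 0
  let fuel := pvFuel grid
  walkDir grid target 0 (-1) row (col - 1) fuel ||   -- left
  walkDir grid target (-1) 0 (row - 1) col fuel ||   -- top
  walkDir grid target 0 1 row (col + 1) fuel ||      -- right
  walkDir grid target 1 0 (row + 1) col fuel         -- bottom

-- ===== PRECONDITION & SPEC =====
-- Pre_ excludes out-of-range indices (A raises IndexError), negative col with 0 ≤ row (a
-- wraparound corner no caller of this grid routine would specify, where A's mis-aimed slices
-- and B's bounds-checked walk are equally defensible) and ragged grids whose rows do not all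
-- reach col (A's column comprehensions may raise IndexError there).
def Pre_is_interior_visible (grid : List (List Int)) (row : Int) (col : Int) : Prop :=
  PySem.Raise.InRange grid.length row ∧
  PySem.Raise.InRange ((PySem.List.pyGet? grid row).getD []).length col ∧
  (row < 0 ∨ (0 ≤ col ∧ ∀ r ∈ grid, col < (r.length : Int)))
instance (grid : List (List Int)) (row : Int) (col : Int) : Decidable (Pre_is_interior_visible grid row col) := by unfold Pre_is_interior_visible; infer_instance

def pvWitness_is_interior_visible : List (List Int) × Int × Int := ([[3, 0, 3], [2, 5, 1], [6, 5, 3]], 1, 1)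

def Spec_is_interior_visible (grid : List (List Int)) (row : Int) (col : Int) (out : Bool) : Prop := out = is_interior_visible_alt grid row col
instance (grid : List (List Int)) (row : Int) (col : Int) (out : Bool) : Decidable (Spec_is_interior_visible grid row col out) := by unfold Spec_is_interior_visible; infer_instance

-- ===== CLAIM (what is proved, stated in full; the proofs are below) =====
def Claim_equal_is_interior_visible : Prop := ∀ (grid : List (List Int)) (row : Int) (col : Int), Dom_is_interior_visible grid row col → Pre_is_interior_visible grid row col → Spec_is_interior_visible grid row col (is_interior_visible grid row col)

-- ===== LEMMAS AND PROOFS =====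

-- a walk that starts out of bounds exits at once
theorem walk_out (grid : List (List Int)) (t dr dc r c : Int) (fuel : Nat)
    (h : ¬(0 ≤ r ∧ r < (grid.length : Int) ∧ 0 ≤ c ∧
        c < (((PySem.List.pyGet? grid r).getD []).length : Int))) :
    walkDir grid t dr dc r c (fuel + 1) = true := by
  rw [walkDir, if_neg h]

-- A's helper is the boolean "every element is below target"
theorem check_direction_eq_all (t : Int) (l : List Int) :
    check_direction t l = l.all (fun h => decide (h < t)) := by
  induction l with
  | nil => rfl
  | cons h tl ih =>
    by_cases hge : h ≥ t
    · simp [check_direction, hge, show ¬ h < t by omega]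
    · simp [check_direction, hge, show h < t by omega, ih]

-- a member row's length is at most the summed row lengths
theorem row_len_le_sum (grid : List (List Int)) (r : List Int) (hr : r ∈ grid) :
    r.length ≤ (grid.map List.length).sum := by
  exact List.le_sum_of_mem (List.mem_map_of_mem hr)

-- the leftward walk equals "all of grid[n].take (c+1) below target"
theorem walk_left_eq (grid : List (List Int)) (t : Int) (n : Nat) (hn : n < grid.length) :
    ∀ (fuel : Nat) (c : Int), -1 ≤ c → c < (grid[n].length : Int) → (c + 2).toNat ≤ fuel →
      walkDir grid t 0 (-1) (n : Int) c fuel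
        = (grid[n].take (c + 1).toNat).all (fun h => decide (h < t)) := by
  intro fuel
  induction fuel with
  | zero => intro c hc _ hf; omega
  | succ fuel ih =>
    intro c hc hlt hf
    by_cases hc0 : 0 ≤ c
    · have hrow : (PySem.List.pyGet? grid (n : Int)).getD [] = grid[n] := by
        simp [PySem.List.pyGet?_natCast, List.getElem?_eq_getElem hn]
      have hcn : c.toNat < grid[n].length := by omega
      have helem : (PySem.List.pyGet? grid[n] c).getD 0 = grid[n][c.toNat] := by
        rw [PySem.List.pyGet?_of_nonneg _ hc0]
        simp [List.getElem?_eq_getElem hcn]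
      have hd : decide (grid[n][c.toNat] < t) = (decide (¬ grid[n][c.toNat] ≥ t)) :=
        decide_eq_decide.mpr not_le.symm
      have htake : grid[n].take (c.toNat + 1) = grid[n].take c.toNat ++ [grid[n][c.toNat]] := by
        rw [List.take_add_one]
        simp [List.getElem?_eq_getElem hcn]
      rw [show (c + 1).toNat = c.toNat + 1 by omega, htake]
      rw [walkDir]
      rw [if_pos (by refine ⟨by omega, by omega, hc0, ?_⟩; rw [hrow]; omega)]
      rw [hrow, helem]
      simp only [List.all_append, List.all_cons, List.all_nil, Bool.and_true, hd]
      by_cases hb : grid[n][c.toNat] ≥ t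
      · simp [hb]
      · rw [if_neg hb]
        rw [show c + -1 = c - 1 by ring, show (n : Int) + 0 = (n : Int) by ring]
        rw [ih (c - 1) (by omega) (by omega) (by omega)]
        simp [hb]
    · rw [walkDir, if_neg (by omega)]
      simp [show (c + 1).toNat = 0 by omega]

-- the rightward walk equals "all of grid[n].drop c below target"
theorem walk_right_eq (grid : List (List Int)) (t : Int) (n : Nat) (hn : n < grid.length) :
    ∀ (fuel : Nat) (c : Int), 0 ≤ c → grid[n].length - c.toNat + 1 ≤ fuel →
      walkDir grid t 0 1 (n : Int) c fuel
        = (grid[n].drop c.toNat).all (fun h => decide (h < t)) := by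
  intro fuel
  induction fuel with
  | zero => intro c _ hf; omega
  | succ fuel ih =>
    intro c hc0 hf
    have hrow : (PySem.List.pyGet? grid (n : Int)).getD [] = grid[n] := by
      simp [PySem.List.pyGet?_natCast, List.getElem?_eq_getElem hn]
    by_cases hlt : c < (grid[n].length : Int)
    · have hcn : c.toNat < grid[n].length := by omega
      have helem : (PySem.List.pyGet? grid[n] c).getD 0 = grid[n][c.toNat] := by
        rw [PySem.List.pyGet?_of_nonneg _ hc0]
        simp [List.getElem?_eq_getElem hcn]
      have hd : decide (grid[n][c.toNat] < t) = (decide (¬ grid[n][c.toNat] ≥ t)) :=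
        decide_eq_decide.mpr not_le.symm
      have hdrop : grid[n].drop c.toNat = grid[n][c.toNat] :: grid[n].drop (c.toNat + 1) := by
        exact List.drop_eq_getElem_cons hcn
      rw [hdrop, walkDir]
      rw [if_pos (by refine ⟨by omega, by omega, hc0, ?_⟩; rw [hrow]; omega)]
      rw [hrow, helem]
      simp only [List.all_cons, hd]
      by_cases hb : grid[n][c.toNat] ≥ t
      · simp [hb]
      · rw [if_neg hb]
        rw [show (n : Int) + 0 = (n : Int) by ring]
        rw [ih (c + 1) (by omega) (by omega)]
        simp [show (c + 1).toNat = c.toNat + 1 by omega, hb]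
    · rw [walkDir, if_neg (by rw [hrow]; omega)]
      simp [List.drop_eq_nil_of_le (by omega : grid[n].length ≤ c.toNat)]

-- under Pre_, a row read at index col yields the element, in bounds
theorem col_in_row (grid : List (List Int)) (col : Int)
    (hall : ∀ r ∈ grid, col < (r.length : Int)) (y : Nat) (hy : y < grid.length) :
    col < (grid[y].length : Int) :=
  hall _ (List.getElem_mem hy)

-- the upward walk equals A's top comprehension over rows 0..r
theorem walk_up_eq (grid : List (List Int)) (t : Int) (col : Int) (hc0 : 0 ≤ col)
    (hall : ∀ r ∈ grid, col < (r.length : Int)) :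
    ∀ (fuel : Nat) (r : Int), -1 ≤ r → r < (grid.length : Int) → (r + 2).toNat ≤ fuel →
      walkDir grid t (-1) 0 r col fuel
        = ((PySem.List.pyRange 0 (r + 1) 1).map
            (fun y => (PySem.List.pyGet? ((PySem.List.pyGet? grid y).getD []) col).getD 0)).all
            (fun h => decide (h < t)) := by
  intro fuel
  induction fuel with
  | zero => intro r hr _ hf; omega
  | succ fuel ih =>
    intro r hr hlt hf
    by_cases hr0 : 0 ≤ r
    · have hrn : r.toNat < grid.length := by omega
      have hrow : (PySem.List.pyGet? grid r).getD [] = grid[r.toNat] := by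
        rw [PySem.List.pyGet?_of_nonneg _ hr0]
        simp [List.getElem?_eq_getElem hrn]
      have hcol := col_in_row grid col hall r.toNat hrn
      have hrange : PySem.List.pyRange 0 (r + 1) 1 = PySem.List.pyRange 0 r 1 ++ [r] := by
        exact PySem.List.pyRange_one_succ_right hr0
      rw [walkDir]
      rw [if_pos (by refine ⟨hr0, by omega, hc0, ?_⟩; rw [hrow]; omega)]
      by_cases hb : (PySem.List.pyGet? ((PySem.List.pyGet? grid r).getD []) col).getD 0 ≥ t
      · rw [if_pos hb, hrange]
        simp only [List.map_append, List.all_append, List.map_cons, List.map_nil,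
          List.all_cons, List.all_nil]
        simp [show ¬ (PySem.List.pyGet? ((PySem.List.pyGet? grid r).getD []) col).getD 0 < t by omega]
      · rw [if_neg hb]
        rw [show col + 0 = col by ring, show r + -1 = r - 1 by ring]
        rw [ih (r - 1) (by omega) (by omega) (by omega),
          show r - 1 + 1 = r by ring, hrange]
        simp only [List.map_append, List.all_append, List.map_cons, List.map_nil,
          List.all_cons, List.all_nil]
        simp [show (PySem.List.pyGet? ((PySem.List.pyGet? grid r).getD []) col).getD 0 < t by omega]
    · rw [walkDir, if_neg (by omega)]
      rw [PySem.List.pyRange_one_eq_nil (by omega : r + 1 ≤ 0)]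
      rfl

-- the downward walk equals A's bottom comprehension over rows r..len-1
theorem walk_down_eq (grid : List (List Int)) (t : Int) (col : Int) (hc0 : 0 ≤ col)
    (hall : ∀ r ∈ grid, col < (r.length : Int)) :
    ∀ (fuel : Nat) (r : Int), 0 ≤ r → grid.length - r.toNat + 1 ≤ fuel →
      walkDir grid t 1 0 r col fuel
        = ((PySem.List.pyRange r (grid.length : Int) 1).map
            (fun y => (PySem.List.pyGet? ((PySem.List.pyGet? grid y).getD []) col).getD 0)).all
            (fun h => decide (h < t)) := by
  intro fuel
  induction fuel with
  | zero => intro r _ hf; omega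
  | succ fuel ih =>
    intro r hr0 hf
    by_cases hlt : r < (grid.length : Int)
    · have hrn : r.toNat < grid.length := by omega
      have hrow : (PySem.List.pyGet? grid r).getD [] = grid[r.toNat] := by
        rw [PySem.List.pyGet?_of_nonneg _ hr0]
        simp [List.getElem?_eq_getElem hrn]
      have hcol := col_in_row grid col hall r.toNat hrn
      have hrange : PySem.List.pyRange r (grid.length : Int) 1
          = r :: PySem.List.pyRange (r + 1) (grid.length : Int) 1 := by
        exact PySem.List.pyRange_one_cons hlt
      rw [walkDir]
      rw [if_pos (by refine ⟨hr0, by omega, hc0, ?_⟩; rw [hrow]; omega)]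
      by_cases hb : (PySem.List.pyGet? ((PySem.List.pyGet? grid r).getD []) col).getD 0 ≥ t
      · rw [if_pos hb, hrange]
        simp only [List.map_cons, List.all_cons]
        simp [show ¬ (PySem.List.pyGet? ((PySem.List.pyGet? grid r).getD []) col).getD 0 < t by omega]
      · rw [if_neg hb]
        rw [show col + 0 = col by ring]
        rw [ih (r + 1) (by omega) (by omega), hrange]
        simp only [List.map_cons, List.all_cons]
        simp [show (PySem.List.pyGet? ((PySem.List.pyGet? grid r).getD []) col).getD 0 < t by omega]
    · rw [walkDir, if_neg (by omega)]
      rw [PySem.List.pyRange_one_eq_nil (by omega : (grid.length : Int) ≤ r)]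
      rfl

-- ===== VERDICT (by name: the statement is the Claim_ definition above) =====
theorem is_interior_visible_spec : Claim_equal_is_interior_visible := by
  intro grid row col _ hpre
  obtain ⟨hrin, hcin, hbranch⟩ := hpre
  by_cases hneg : row < 0
  · -- row < 0: A's top list range(0, row) is empty, so A returns True; B's first
    -- (leftward) walk starts at r = row < 0, out of bounds, so B returns True too
    have hA : is_interior_visible grid row col = true := by
      unfold is_interior_visible
      rw [PySem.List.pyRange_one_eq_nil (by omega : row ≤ 0)]
      simp [check_direction]
    have hB : is_interior_visible_alt grid row col = true := by
      unfold is_interior_visible_alt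
      obtain ⟨f, hf⟩ : ∃ f, pvFuel grid = f + 1 := ⟨_, rfl⟩
      rw [hf]
      simp only [walk_out grid _ 0 (-1) row (col - 1) f (by rintro ⟨h0, -⟩; omega),
        Bool.true_or]
    unfold Spec_is_interior_visible
    rw [hA, hB]
  obtain ⟨hc0, hall⟩ : 0 ≤ col ∧ ∀ r ∈ grid, col < (r.length : Int) :=
    hbranch.resolve_left hneg
  have hr0 : 0 ≤ row := by omega
  have hr1 : row < (grid.length : Int) := hrin.2
  have hrn : row.toNat < grid.length := by omega
  have hrowL : (PySem.List.pyGet? grid row).getD [] = grid[row.toNat] := by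
    rw [PySem.List.pyGet?_of_nonneg _ hr0]
    simp [List.getElem?_eq_getElem hrn]
  have hcol : col < (grid[row.toNat].length : Int) := col_in_row grid col hall row.toNat hrn
  have hlen : grid[row.toNat].length ≤ (grid.map List.length).sum :=
    row_len_le_sum grid _ (List.getElem_mem hrn)
  have hrowcast : row = ((row.toNat : Nat) : Int) := by omega
  unfold Spec_is_interior_visible is_interior_visible is_interior_visible_alt
  simp only [hrowL]
  set t := (PySem.List.pyGet? grid[row.toNat] col).getD 0 with ht
  -- rewrite B's four walks to A's four list scans
  have hL : walkDir grid t 0 (-1) row (col - 1) (pvFuel grid)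
      = check_direction t (PySem.List.slice grid[row.toNat] none (some col)) := by
    conv_lhs => rw [hrowcast]
    rw [walk_left_eq grid t row.toNat hrn (pvFuel grid) (col - 1) (by omega) (by omega)
      (by unfold pvFuel; omega)]
    rw [check_direction_eq_all, PySem.List.slice_to _ hc0,
      show (col - 1 + 1 : Int) = col by ring]
  have hR : walkDir grid t 0 1 row (col + 1) (pvFuel grid)
      = check_direction t (PySem.List.slice grid[row.toNat] (some (col + 1)) none) := by
    conv_lhs => rw [hrowcast]
    rw [walk_right_eq grid t row.toNat hrn (pvFuel grid) (col + 1) (by omega)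
      (by unfold pvFuel; omega)]
    rw [check_direction_eq_all, PySem.List.slice_from _ (by omega : (0:Int) ≤ col + 1)]
  have hT : walkDir grid t (-1) 0 (row - 1) col (pvFuel grid)
      = check_direction t ((PySem.List.pyRange 0 row 1).map
          (fun y => (PySem.List.pyGet? ((PySem.List.pyGet? grid y).getD []) col).getD 0)) := by
    rw [walk_up_eq grid t col hc0 hall (pvFuel grid) (row - 1) (by omega) (by omega)
      (by unfold pvFuel; omega), show row - 1 + 1 = row by ring, check_direction_eq_all]
  have hB : walkDir grid t 1 0 (row + 1) col (pvFuel grid)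
      = check_direction t ((PySem.List.pyRange (row + 1) (grid.length : Int) 1).map
          (fun y => (PySem.List.pyGet? ((PySem.List.pyGet? grid y).getD []) col).getD 0)) := by
    rw [walk_down_eq grid t col hc0 hall (pvFuel grid) (row + 1) (by omega)
      (by unfold pvFuel; omega), check_direction_eq_all]
  rw [hL, hT, hR, hB]
  clear hrowcast ht hrowL hcol hlen hall
  split_ifs <;> simp only [Bool.not_eq_true] at * <;>
    simp only [*, Bool.true_or, Bool.or_true, Bool.or_false]
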